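-- pv_equiv track=rewrite | github.com/tasosvaf/scinetanio | SCINet/utils/utils_ETTh.py | getOnlyFilesThatApplyToAndFilters
-- ===== SOURCE A (Python) =====
-- def getOnlyFilesThatApplyToAndFilters(files, and_filters):
--     if and_filters == None or len(and_filters) == 0:
--         return files
--
--     result_files = []
--     for file in files:
--         if all(and_filter in file for and_filter in and_filters):
--             result_files.append(file)
--
--     return result_files
-- ===== SOURCE B (Python) =====
-- def _narrow(kept, filters):
--     if not filters:
--         return kept
--     head, rest = filters[0], filters[1:]
--     return _narrow([f for f in kept if head in f], rest)
--
-- def getOnlyFilesThatApplyToAndFilters(files, and_filters):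
--     if and_filters == None or len(and_filters) == 0:
--         return files
--     return _narrow(files, and_filters)
-- ===== Notes on version B (the rewrite author's own statement) =====
-- stated objective: alternative
-- what changed: B narrows the list by recursion on the filters (each step filters the kept list by one substring), instead of A's single pass over files testing all filters per file with an accumulator.
import Mathlib
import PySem

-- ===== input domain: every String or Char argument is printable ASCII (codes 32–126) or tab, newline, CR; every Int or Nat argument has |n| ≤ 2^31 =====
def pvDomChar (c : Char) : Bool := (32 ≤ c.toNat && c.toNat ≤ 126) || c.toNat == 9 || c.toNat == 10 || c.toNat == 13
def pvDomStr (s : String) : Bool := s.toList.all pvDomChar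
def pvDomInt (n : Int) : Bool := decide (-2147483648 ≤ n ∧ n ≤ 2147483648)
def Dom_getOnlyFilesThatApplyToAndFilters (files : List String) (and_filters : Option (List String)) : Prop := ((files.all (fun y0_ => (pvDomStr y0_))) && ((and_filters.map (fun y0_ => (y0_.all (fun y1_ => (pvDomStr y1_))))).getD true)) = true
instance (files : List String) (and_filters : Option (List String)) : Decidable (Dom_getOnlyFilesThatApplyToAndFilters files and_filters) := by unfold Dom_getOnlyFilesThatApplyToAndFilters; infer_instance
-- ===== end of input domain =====

-- B narrows the list by recursion on the filters (one filter pass per step) instead of A's single accumulator pass testing all filters per file; same cost, different decomposition.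


-- ===== PORT A =====
def getOnlyFilesThatApplyToAndFilters (files : List String) (and_filters : Option (List String)) : List String :=
  match and_filters with
  | none => files
  | some fs =>
    if fs.length = 0 then files
    else
      files.foldl (fun result_files file =>
        if fs.all (fun and_filter => PySem.Str.isIn and_filter file) then result_files ++ [file]
        else result_files) []

-- ===== PORT B =====
-- helper _narrow: recursion on the filter list, filtering the kept list by one substring per step
def pvNarrow (kept : List String) (filters : List String) : List String :=
  match filters with
  | [] => kept
  | head :: rest => pvNarrow (kept.filter (fun f => PySem.Str.isIn head f)) rest

def getOnlyFilesThatApplyToAndFilters_alt (files : List String) (and_filters : Option (List String)) : List String :=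
  match and_filters with
  | none => files
  | some fs => if fs.length = 0 then files else pvNarrow files fs

-- ===== PRECONDITION & SPEC =====
def Spec_getOnlyFilesThatApplyToAndFilters (files : List String) (and_filters : Option (List String)) (out : List String) : Prop := out = getOnlyFilesThatApplyToAndFilters_alt files and_filters
instance (files : List String) (and_filters : Option (List String)) (out : List String) : Decidable (Spec_getOnlyFilesThatApplyToAndFilters files and_filters out) := by unfold Spec_getOnlyFilesThatApplyToAndFilters; infer_instance

-- ===== CLAIM (what is proved, stated in full; the proofs are below) =====
def Claim_equal_getOnlyFilesThatApplyToAndFilters : Prop := ∀ (files : List String) (and_filters : Option (List String)), Dom_getOnlyFilesThatApplyToAndFilters files and_filters → Spec_getOnlyFilesThatApplyToAndFilters files and_filters (getOnlyFilesThatApplyToAndFilters files and_filters)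

-- ===== LEMMAS AND PROOFS =====
-- B's recursive narrowing equals one filter with the conjunction of all filter tests.
theorem pvNarrow_eq_filter (fs : List String) (files : List String) :
    pvNarrow files fs = files.filter (fun f => fs.all (fun flt => PySem.Str.isIn flt f)) := by
  induction fs generalizing files with
  | nil => simp [pvNarrow]
  | cons h t ih =>
    simp only [pvNarrow, ih, List.filter_filter, List.all_cons]
    congr 1
    funext a
    exact Bool.and_comm _ _

-- ===== VERDICT (by name: the statement is the Claim_ definition above) =====
theorem getOnlyFilesThatApplyToAndFilters_spec : Claim_equal_getOnlyFilesThatApplyToAndFilters := by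
  intro files and_filters _
  unfold Spec_getOnlyFilesThatApplyToAndFilters getOnlyFilesThatApplyToAndFilters getOnlyFilesThatApplyToAndFilters_alt
  cases and_filters with
  | none => rfl
  | some fs =>
    by_cases h : fs.length = 0
    · simp [h]
    · simp only [h, if_false]
      rw [PySem.List.foldl_append_if_eq_filter, pvNarrow_eq_filter]
      simp
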